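-- pv_equiv track=rewrite | github.com/icerovski/Python_Fundamentals | Unit_07/Text_11_temp.py | pyramidic
-- ===== SOURCE A (Python) =====
-- def pyramidic(k, base, input_list):
--     # Base Case
--     if input_list == []:
--         return base
--
--     # Recursive Case
--     else:
--         if k in input_list[0].keys() and input_list[0][k] >= base + 2:
--             smaller_list = input_list[1:]
--             return pyramidic(k, base + 2, smaller_list)
--
--         elif base > 1: # at least one iteration has happened
--             return base
-- ===== SOURCE B (Python) =====
-- def pyramidic(k, base, input_list):
--     # Single pass by index: no slicing, no recursion; the base at step i is the closed form base + 2*i.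
--     n = len(input_list)
--     i = 0
--     while i < n:
--         d = input_list[i]
--         if k not in d or d[k] < base + 2 * (i + 1):
--             b = base + 2 * i
--             return b if b > 1 else None
--         i += 1
--     return base + 2 * n
-- ===== Notes on version B (the rewrite author's own statement) =====
-- stated objective: alternative
-- what changed: Replaces the recursion that copies the tail with input_list[1:] at every step by a single index-based loop that derives the running base from the closed form base + 2*i, so no slices and no recursion are used.
import Mathlib
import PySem

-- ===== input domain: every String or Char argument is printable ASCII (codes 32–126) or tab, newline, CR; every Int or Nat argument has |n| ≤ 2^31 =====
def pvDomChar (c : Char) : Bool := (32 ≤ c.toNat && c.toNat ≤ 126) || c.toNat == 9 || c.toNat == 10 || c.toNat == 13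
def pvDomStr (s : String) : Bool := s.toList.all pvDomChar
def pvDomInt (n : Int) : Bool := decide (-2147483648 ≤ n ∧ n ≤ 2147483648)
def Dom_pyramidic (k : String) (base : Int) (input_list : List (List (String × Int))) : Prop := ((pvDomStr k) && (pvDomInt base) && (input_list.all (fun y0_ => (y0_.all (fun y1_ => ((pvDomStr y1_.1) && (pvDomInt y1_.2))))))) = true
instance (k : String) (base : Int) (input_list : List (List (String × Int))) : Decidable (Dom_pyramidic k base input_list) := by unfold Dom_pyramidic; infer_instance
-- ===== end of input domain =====

-- B replaces A's slicing recursion by one index loop with the closed form base + 2*i (alternative structure, no slices).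

-- ===== PORT A =====
-- literal recursion: test k in dict, threshold base+2, recurse on the tail slice with base+2
def pyramidic (k : String) (base : Int) (input_list : List (List (String × Int))) : Option Int :=
  match input_list with
  | [] => some base
  | d :: rest =>
    match (PySem.Dict.mk d).get? k with          -- 'k in input_list[0].keys() and input_list[0][k] >= base + 2'
    | some v =>
      if v ≥ base + 2 then pyramidic k (base + 2) rest
      else if base > 1 then some base else none
    | none => if base > 1 then some base else none

-- ===== PORT B =====
-- B's while-loop over the index i; the running base is the closed form base + 2*i
def pyrLoop (k : String) (base : Int) (i : Int) : List (List (String × Int)) → Option Int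
  | [] => some (base + 2 * i)                    -- loop ran off the end: return base + 2*n
  | d :: rest =>
    match (PySem.Dict.mk d).get? k with          -- 'k not in d or d[k] < base + 2*(i+1)'
    | some v =>
      if v < base + 2 * (i + 1) then
        let b := base + 2 * i
        if b > 1 then some b else none
      else pyrLoop k base (i + 1) rest
    | none =>
      let b := base + 2 * i
      if b > 1 then some b else none

def pyramidic_alt (k : String) (base : Int) (input_list : List (List (String × Int))) : Option Int :=
  pyrLoop k base 0 input_list

-- ===== PRECONDITION & SPEC =====
def Spec_pyramidic (k : String) (base : Int) (input_list : List (List (String × Int))) (out : Option Int) : Prop := out = pyramidic_alt k base input_list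
instance (k : String) (base : Int) (input_list : List (List (String × Int))) (out : Option Int) : Decidable (Spec_pyramidic k base input_list out) := by unfold Spec_pyramidic; infer_instance

-- ===== CLAIM (what is proved, stated in full; the proofs are below) =====
def Claim_equal_pyramidic : Prop := ∀ (k : String) (base : Int) (input_list : List (List (String × Int))), Dom_pyramidic k base input_list → Spec_pyramidic k base input_list (pyramidic k base input_list)

-- ===== LEMMAS AND PROOFS =====
-- loop invariant: A called with running base 'base + 2*i' equals B's loop at index i
theorem pyramidic_eq_pyrLoop (k : String) (base : Int) (l : List (List (String × Int))) :
    ∀ i : Int, pyramidic k (base + 2 * i) l = pyrLoop k base i l := by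
  induction l with
  | nil => intro i; simp [pyramidic, pyrLoop]
  | cons d rest ih =>
    intro i
    simp only [pyramidic, pyrLoop]
    cases (PySem.Dict.mk d).get? k with
    | none => rfl
    | some v =>
      simp only []
      by_cases h : v ≥ base + 2 * i + 2
      · rw [if_pos h, if_neg (by omega)]
        have := ih (i + 1)
        rw [show base + 2 * i + 2 = base + 2 * (i + 1) by ring]
        exact this
      · rw [if_neg h, if_pos (show v < base + 2 * (i + 1) by omega)]

-- ===== VERDICT (by name: the statement is the Claim_ definition above) =====
theorem pyramidic_spec : Claim_equal_pyramidic := by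
  intro k base input_list _
  unfold Spec_pyramidic pyramidic_alt
  have := pyramidic_eq_pyrLoop k base input_list 0
  simpa using this
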